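-- pv_equiv track=rewrite | github.com/Pitzanami/InvestigacionEJ2025 | CPG_tools.py | shapetocoords
-- ===== SOURCE A (Python) =====
-- def shapetocoords(shape):
--     l = []
--
--     X, Y, Z = shape
--     n = X*Y*Z
--
--     for i in range(n):
--         x = i // (Y*Z)
--         y = (i % (Y*Z))//Z
--         z = i % Z
--         l.append((x,y,z))
--
--     return l
-- ===== SOURCE B (Python) =====
-- def shapetocoords(shape):
--     X, Y, Z = shape
--     if X <= 0 or Y <= 0 or Z <= 0:
--         return []
--     l = []
--     for x in range(X):
--         for y in range(Y):
--             for z in range(Z):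
--                 l.append((x, y, z))
--     return l
-- ===== Notes on version B (the rewrite author's own statement) =====
-- stated objective: simpler
-- what changed: Replaces the single flat loop over range(X*Y*Z) that reconstructs x,y,z from the flat index with // and % by three nested loops emitting (x,y,z) directly in row-major order.
-- intended difference: On shapes whose product X*Y*Z is positive while not all three dimensions are positive (exactly two negative dimensions), A returns X*Y*Z junk tuples produced by floor-division on negative sizes (e.g. (1,-1,-1) -> [(0,0,0)]), while B returns the empty list, the intended coordinate set of an empty grid. — e.g. on shapetocoords(1, -1, -1): A returns [(0, 0, 0)], B returns []
import Mathlib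
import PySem

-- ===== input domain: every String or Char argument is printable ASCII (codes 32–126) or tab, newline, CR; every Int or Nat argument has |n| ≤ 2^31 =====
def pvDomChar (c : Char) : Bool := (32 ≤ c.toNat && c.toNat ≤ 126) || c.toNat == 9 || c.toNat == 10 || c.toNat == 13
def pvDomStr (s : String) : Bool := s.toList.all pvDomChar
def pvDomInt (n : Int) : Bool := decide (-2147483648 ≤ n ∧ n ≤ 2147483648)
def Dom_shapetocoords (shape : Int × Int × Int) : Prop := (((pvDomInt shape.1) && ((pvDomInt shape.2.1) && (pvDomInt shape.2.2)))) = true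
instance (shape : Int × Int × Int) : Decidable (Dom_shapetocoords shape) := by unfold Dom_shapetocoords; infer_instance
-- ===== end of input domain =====

-- B replaces A's flat loop over range(X*Y*Z) with //-and-% index arithmetic by three
-- nested loops emitting (x,y,z) directly; on shapes with exactly two negative dimensions
-- A returns junk tuples and B returns [] (see D_ below).

-- ===== PORT A =====
def shapetocoords (shape : Int × Int × Int) : List (Int × Int × Int) :=
  let X := shape.1; let Y := shape.2.1; let Z := shape.2.2
  let n := X * Y * Z
  (PySem.List.pyRange 0 n 1).foldl
    (fun l i =>
      l ++ [(PySem.Int.floordiv i (Y * Z),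
             PySem.Int.floordiv (PySem.Int.mod i (Y * Z)) Z,
             PySem.Int.mod i Z)]) []

-- ===== PORT B =====
def shapetocoords_alt (shape : Int × Int × Int) : List (Int × Int × Int) :=
  let X := shape.1; let Y := shape.2.1; let Z := shape.2.2
  if X ≤ 0 ∨ Y ≤ 0 ∨ Z ≤ 0 then [] else
  (PySem.List.pyRange 0 X 1).foldl
    (fun l x =>
      (PySem.List.pyRange 0 Y 1).foldl
        (fun l y =>
          (PySem.List.pyRange 0 Z 1).foldl
            (fun l z => l ++ [(x, y, z)]) l) l) []

-- ===== PRECONDITION & SPEC =====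
-- On shapes with X*Y*Z > 0 but not all three dimensions positive (exactly two negative),
-- A returns X*Y*Z tuples of floor-division junk while B returns [], the coordinate list
-- of an empty grid, which is the intended value.
def D_shapetocoords (shape : Int × Int × Int) : Prop :=
  0 < shape.1 * shape.2.1 * shape.2.2 ∧ ¬ (0 < shape.1 ∧ 0 < shape.2.1 ∧ 0 < shape.2.2)
instance (shape : Int × Int × Int) : Decidable (D_shapetocoords shape) := by
  unfold D_shapetocoords; infer_instance

def Spec_shapetocoords (shape : Int × Int × Int) (out : List (Int × Int × Int)) : Prop :=
  ¬ D_shapetocoords shape → out = shapetocoords_alt shape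
instance (shape : Int × Int × Int) (out : List (Int × Int × Int)) : Decidable (Spec_shapetocoords shape out) := by
  unfold Spec_shapetocoords; infer_instance

def pvDiffWitness_shapetocoords : (Int × Int × Int) := (1, -1, -1)
def pvDiffWitnessOut_shapetocoords : (List (Int × Int × Int)) × (List (Int × Int × Int)) :=
  ([(0, 0, 0)], [])

-- ===== CLAIM (what is proved, stated in full; the proofs are below) =====
def Claim_unchanged_shapetocoords : Prop :=
  ∀ (shape : Int × Int × Int), Dom_shapetocoords shape → Spec_shapetocoords shape (shapetocoords shape)
def Claim_changed_shapetocoords : Prop :=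
  Dom_shapetocoords (pvDiffWitness_shapetocoords) ∧ D_shapetocoords (pvDiffWitness_shapetocoords) ∧
  shapetocoords (pvDiffWitness_shapetocoords) = pvDiffWitnessOut_shapetocoords.1 ∧
  shapetocoords_alt (pvDiffWitness_shapetocoords) = pvDiffWitnessOut_shapetocoords.2 ∧
  pvDiffWitnessOut_shapetocoords.1 ≠ pvDiffWitnessOut_shapetocoords.2
def Claim_exact_shapetocoords : Prop :=
  ∀ (shape : Int × Int × Int), Dom_shapetocoords shape → D_shapetocoords shape →
    shapetocoords shape ≠ shapetocoords_alt shape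

-- ===== LEMMAS AND PROOFS =====

lemma flatten_map_singleton {α β : Type} (f : α → β) (l : List α) :
    (l.map (fun x => [f x])).flatten = l.map f := by
  induction l with
  | nil => rfl
  | cons x xs ih => simp [ih]

-- Splitting a range of a product: mapping f (i/m) (i%m) over range (a*m) enumerates f x j.
lemma range_mul_map {α : Type} (a m : Nat) (f : Nat → Nat → α) :
    (List.range (a * m)).map (fun i => f (i / m) (i % m)) =
      (List.range a).flatMap (fun x => (List.range m).map (f x)) := by
  induction a with
  | zero => simp
  | succ a ih =>
    rw [Nat.succ_mul, List.range_add, List.map_append, ih, List.range_succ,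
      List.flatMap_append]
    simp only [List.flatMap_cons, List.flatMap_nil, List.append_nil]
    congr 1
    rw [List.map_map]
    apply List.map_congr_left
    intro j hj
    have hj' : j < m := List.mem_range.mp hj
    have hm : 0 < m := by omega
    have h1 : (a * m + j) / m = a := by
      rw [Nat.mul_comm a m, Nat.mul_add_div hm, Nat.div_eq_of_lt hj', Nat.add_zero]
    have h2 : (a * m + j) % m = j := by
      rw [Nat.mul_comm a m, Nat.mul_add_mod, Nat.mod_eq_of_lt hj']
    simp [h1, h2]

-- B's nested appending foldls are the nested flatMap/map.
lemma alt_eq_flatMap (X Y Z : Int) (hx : 0 < X) (hy : 0 < Y) (hz : 0 < Z) :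
    shapetocoords_alt (X, Y, Z) =
      (PySem.List.pyRange 0 X 1).flatMap (fun x =>
        (PySem.List.pyRange 0 Y 1).flatMap (fun y =>
          (PySem.List.pyRange 0 Z 1).map (fun z => (x, y, z)))) := by
  have h : ¬ ((X, Y, Z).1 ≤ 0 ∨ (X, Y, Z).2.1 ≤ 0 ∨ (X, Y, Z).2.2 ≤ 0) := by
    simp only []; omega
  simp [shapetocoords_alt, if_neg h, List.flatMap_def, flatten_map_singleton]

lemma alt_nil_of_nonpos (X Y Z : Int) (h : X ≤ 0 ∨ Y ≤ 0 ∨ Z ≤ 0) :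
    shapetocoords_alt (X, Y, Z) = [] := by
  simp only [shapetocoords_alt, if_pos h]

lemma a_eq_map (X Y Z : Int) :
    shapetocoords (X, Y, Z) =
      (PySem.List.pyRange 0 (X * Y * Z) 1).map (fun i =>
        (PySem.Int.floordiv i (Y * Z),
         PySem.Int.floordiv (PySem.Int.mod i (Y * Z)) Z,
         PySem.Int.mod i Z)) := by
  simp [shapetocoords, flatten_map_singleton]

-- the main case: all three dimensions positive
lemma eq_of_pos (X Y Z : Int) (hx : 0 < X) (hy : 0 < Y) (hz : 0 < Z) :
    shapetocoords (X, Y, Z) = shapetocoords_alt (X, Y, Z) := by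
  obtain ⟨a, rfl⟩ := Int.eq_ofNat_of_zero_le hx.le
  obtain ⟨b, rfl⟩ := Int.eq_ofNat_of_zero_le hy.le
  obtain ⟨c, rfl⟩ := Int.eq_ofNat_of_zero_le hz.le
  rw [a_eq_map, alt_eq_flatMap _ _ _ hx hy hz]
  have hbc : ((b : Int) * c) = ((b * c : Nat) : Int) := by push_cast; ring
  have L : PySem.List.pyRange 0 ((a : Int) * b * c) 1 =
      (List.range (a * (b * c))).map (Nat.cast : Nat → Int) := by
    have hcast : ((a : Int) * b * c) = ((a * (b * c) : Nat) : Int) := by push_cast; ring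
    rw [hcast, PySem.List.pyRange_zero, Int.toNat_natCast]
  have Ra : PySem.List.pyRange 0 ((a : Int)) 1 = (List.range a).map (Nat.cast : Nat → Int) := by
    rw [PySem.List.pyRange_zero, Int.toNat_natCast]
  have Rb : PySem.List.pyRange 0 ((b : Int)) 1 = (List.range b).map (Nat.cast : Nat → Int) := by
    rw [PySem.List.pyRange_zero, Int.toNat_natCast]
  have Rc : PySem.List.pyRange 0 ((c : Int)) 1 = (List.range c).map (Nat.cast : Nat → Int) := by
    rw [PySem.List.pyRange_zero, Int.toNat_natCast]
  trans ((List.range a).flatMap fun x => (List.range b).flatMap fun y =>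
    (List.range c).map fun z => (((x : Nat) : Int), ((y : Nat) : Int), ((z : Nat) : Int)))
  · rw [L, List.map_map]
    have hpt : ∀ i ∈ List.range (a * (b * c)),
        ((fun i => (PySem.Int.floordiv i ((b : Int) * c),
            PySem.Int.floordiv (PySem.Int.mod i ((b : Int) * c)) (c : Int),
            PySem.Int.mod i (c : Int))) ∘ (Nat.cast : Nat → Int)) i =
          (fun x j => (((x : Nat) : Int), ((j / c : Nat) : Int), ((j % c : Nat) : Int)))
            (i / (b * c)) (i % (b * c)) := by
      intro i _
      have hic : i % c = (i % (b * c)) % c :=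
        (Nat.mod_mod_of_dvd i (Dvd.intro_left b rfl)).symm
      simp only [Function.comp_apply, hbc, PySem.Int.floordiv_natCast, PySem.Int.mod_natCast]
      rw [hic]
    rw [List.map_congr_left hpt]
    refine (range_mul_map a (b * c)
      (fun x j => (((x : Nat) : Int), ((j / c : Nat) : Int), ((j % c : Nat) : Int)))).trans ?_
    congr 1
    funext x
    exact range_mul_map b c fun y z => (((x : Nat) : Int), ((y : Nat) : Int), ((z : Nat) : Int))
  · rw [Ra, Rb, Rc]
    simp [List.flatMap_map, List.map_map, Function.comp_def]

-- ===== VERDICT (by name: the statement is the Claim_ definition above) =====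
theorem shapetocoords_spec : Claim_unchanged_shapetocoords := by
  intro shape _ hD
  obtain ⟨X, Y, Z⟩ := shape
  show shapetocoords (X, Y, Z) = shapetocoords_alt (X, Y, Z)
  by_cases hpos : 0 < X ∧ 0 < Y ∧ 0 < Z
  · exact eq_of_pos X Y Z hpos.1 hpos.2.1 hpos.2.2
  · have hn : X * Y * Z ≤ 0 := by
      by_contra hc
      have h : 0 < X * Y * Z := by omega
      exact absurd (⟨h, hpos⟩ : D_shapetocoords (X, Y, Z)) hD
    rw [alt_nil_of_nonpos X Y Z (by omega), a_eq_map,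
      PySem.List.pyRange_one_eq_nil hn, List.map_nil]

theorem shapetocoords_changed : Claim_changed_shapetocoords := by
  unfold Claim_changed_shapetocoords; decide

theorem shapetocoords_tight : Claim_exact_shapetocoords := by
  intro shape _ hD
  obtain ⟨X, Y, Z⟩ := shape
  obtain ⟨hn, hpos⟩ := hD
  have hn' : 0 < X * Y * Z := hn
  have hpos' : ¬ (0 < X ∧ 0 < Y ∧ 0 < Z) := hpos
  rw [alt_nil_of_nonpos X Y Z (by omega), a_eq_map]
  intro h
  have := congrArg List.length h
  simp [PySem.List.length_pyRange_one] at this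
  omega
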